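-- pv_equiv track=rewrite | github.com/mandosclaw/swarmpulse-results | missions/oss-supply-chain-compromise-monitor/implement-typosquatting-detector.py | _prefix_suffix_analysis
-- ===== SOURCE A (Python) =====
-- from typing import List, Dict, Tuple, Set
--
-- def _prefix_suffix_analysis(s1: str, s2: str) -> Tuple[bool, Dict]:
--     """Detect if one is a prefix/suffix variant of another."""
--     s1_lower = s1.lower()
--     s2_lower = s2.lower()
--
--     details = {}
--
--     # Check if s2 is s1 with prefix
--     for i in range(1, min(4, len(s2_lower))):
--         if s2_lower[i:] == s1_lower:
--             return True, {'variant': 'prefix_added', 'prefix': s2_lower[:i]}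
--
--     # Check if s2 is s1 with suffix
--     for i in range(1, min(4, len(s2_lower))):
--         if s2_lower[:-i] == s1_lower:
--             return True, {'variant': 'suffix_added', 'suffix': s2_lower[-i:]}
--
--     # Check if s2 is s1 with extra chars in middle
--     if len(s2_lower) > len(s1_lower) + 1:
--         for i in range(len(s1_lower) - 1):
--             for j in range(1, len(s2_lower) - len(s1_lower) + 1):
--                 if (s2_lower[:i+j] == s1_lower[:i+1] and
--                     s2_lower[i+j+1:] == s1_lower[i+1:]):
--                     return True, {'variant': 'char_insertion', 'position': i}
--
--     return False, details
-- ===== SOURCE B (Python) =====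
-- def _prefix_suffix_analysis(s1: str, s2: str):
--     """Detect if one is a prefix/suffix variant of another (closed-form, loop-free)."""
--     a = s1.lower()
--     b = s2.lower()
--     d = len(b) - len(a)
--     if 1 <= d <= 3 and d < len(b):
--         if b[d:] == a:
--             return True, {'variant': 'prefix_added', 'prefix': b[:d]}
--         if b[:-d] == a:
--             return True, {'variant': 'suffix_added', 'suffix': b[-d:]}
--     return False, {}
-- ===== Notes on version B (the rewrite author's own statement) =====
-- stated objective: simpler
-- what changed: Replaces A's two slice-comparison loops and dead nested char_insertion block by a single closed-form candidate offset diff = len(s2)-len(s1): only that offset can satisfy either slice equality, so B does one guard and at most two slice comparisons with no loops.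
import Mathlib
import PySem

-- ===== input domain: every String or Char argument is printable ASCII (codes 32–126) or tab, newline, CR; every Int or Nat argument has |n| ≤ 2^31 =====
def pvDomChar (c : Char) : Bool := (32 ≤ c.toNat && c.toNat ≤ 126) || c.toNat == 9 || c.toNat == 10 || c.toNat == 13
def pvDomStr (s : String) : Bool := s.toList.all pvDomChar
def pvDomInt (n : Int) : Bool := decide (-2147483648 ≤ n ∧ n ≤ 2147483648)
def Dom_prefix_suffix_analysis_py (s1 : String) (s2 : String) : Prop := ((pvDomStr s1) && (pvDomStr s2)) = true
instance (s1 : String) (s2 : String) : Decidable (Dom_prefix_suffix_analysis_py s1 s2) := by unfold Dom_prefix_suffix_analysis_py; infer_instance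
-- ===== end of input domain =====

-- B replaces A's three search loops by the single candidate offset diff = len(s2)-len(s1)
-- (the only index either slice-equality loop can accept; A's char_insertion block is dead),
-- objective: simpler.  No arguments are mutated by either version.

-- ===== PORT A =====
-- for i in range(1, min(4, len(s2_lower))): if s2_lower[i:] == s1_lower: return …
def pvAPrefixLoop (a b : List Char) : Option (Bool × (List (String × String))) :=
  (PySem.List.pyRange 1 (min 4 (b.length : Int)) 1).findSome? (fun i =>
    if PySem.List.slice b (some i) none = a then
      some (true, [("variant", "prefix_added"), ("prefix", String.ofList (PySem.List.slice b none (some i)))])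
    else none)

-- for i in range(1, min(4, len(s2_lower))): if s2_lower[:-i] == s1_lower: return …
def pvASuffixLoop (a b : List Char) : Option (Bool × (List (String × String))) :=
  (PySem.List.pyRange 1 (min 4 (b.length : Int)) 1).findSome? (fun i =>
    if PySem.List.slice b none (some (-i)) = a then
      some (true, [("variant", "suffix_added"), ("suffix", String.ofList (PySem.List.slice b (some (-i)) none))])
    else none)

-- the nested char_insertion loops; 'position' is an int in Python — rendered with str here,
-- harmless because this block is proved unreachable (pvAInsLoop_eq_none below)
def pvAInsLoop (a b : List Char) : Option (Bool × (List (String × String))) :=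
  (PySem.List.pyRange 0 ((a.length : Int) - 1) 1).findSome? (fun i =>
    (PySem.List.pyRange 1 ((b.length : Int) - (a.length : Int) + 1) 1).findSome? (fun j =>
      if PySem.List.slice b none (some (i + j)) = PySem.List.slice a none (some (i + 1)) ∧
         PySem.List.slice b (some (i + j + 1)) none = PySem.List.slice a (some (i + 1)) none then
        some (true, [("variant", "char_insertion"), ("position", PySem.Int.toStr i)])
      else none))

def prefix_suffix_analysis_py (s1 : String) (s2 : String) : Bool × (List (String × String)) :=
  let a := PySem.Chars.lower s1.toList
  let b := PySem.Chars.lower s2.toList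
  match pvAPrefixLoop a b with
  | some r => r
  | none =>
    match pvASuffixLoop a b with
    | some r => r
    | none =>
      if ((b.length : Int) > (a.length : Int) + 1) then
        match pvAInsLoop a b with
        | some r => r
        | none => (false, [])
      else (false, [])

-- ===== PORT B =====
def prefix_suffix_analysis_py_alt (s1 : String) (s2 : String) : Bool × (List (String × String)) :=
  let a := PySem.Chars.lower s1.toList
  let b := PySem.Chars.lower s2.toList
  let d : Int := (b.length : Int) - (a.length : Int)
  if 1 ≤ d ∧ d ≤ 3 ∧ d < (b.length : Int) then
    if PySem.List.slice b (some d) none = a then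
      (true, [("variant", "prefix_added"), ("prefix", String.ofList (PySem.List.slice b none (some d)))])
    else if PySem.List.slice b none (some (-d)) = a then
      (true, [("variant", "suffix_added"), ("suffix", String.ofList (PySem.List.slice b (some (-d)) none))])
    else (false, [])
  else (false, [])

-- ===== PRECONDITION & SPEC =====
def Spec_prefix_suffix_analysis_py (s1 : String) (s2 : String) (out : Bool × (List (String × String))) : Prop := out = prefix_suffix_analysis_py_alt s1 s2
instance (s1 : String) (s2 : String) (out : Bool × (List (String × String))) : Decidable (Spec_prefix_suffix_analysis_py s1 s2 out) := by unfold Spec_prefix_suffix_analysis_py; infer_instance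

-- ===== CLAIM (what is proved, stated in full; the proofs are below) =====
def Claim_equal_prefix_suffix_analysis_py : Prop := ∀ (s1 : String) (s2 : String), Dom_prefix_suffix_analysis_py s1 s2 → Spec_prefix_suffix_analysis_py s1 s2 (prefix_suffix_analysis_py s1 s2)

-- ===== LEMMAS AND PROOFS =====

-- findSome? returns f i when i is in the list and f vanishes on every other element
theorem pvFindSome_unique {α β : Type} (f : α → Option β) (i : α) :
    ∀ (l : List α), i ∈ l → (∀ j ∈ l, j ≠ i → f j = none) → l.findSome? f = f i := by
  intro l
  induction l with
  | nil => intro h _; cases h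
  | cons x t ih =>
    intro hmem hothers
    cases hfx : f x with
    | some v =>
      have hxi : x = i := by
        by_contra hne
        rw [hothers x (by simp) hne] at hfx
        cases hfx
      rw [List.findSome?_cons, hfx, ← hxi, hfx]
    | none =>
      simp only [List.findSome?_cons, hfx]
      by_cases hxi : x = i
      · subst hxi
        rw [hfx, List.findSome?_eq_none_iff]
        intro j hj
        by_cases hji : j = x
        · subst hji; exact hfx
        · exact hothers j (by simp [hj]) hji
      · rcases List.mem_cons.mp hmem with h | hi
        · exact absurd h.symm hxi
        · exact ih hi (fun j hj hji => hothers j (by simp [hj]) hji)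

-- an index accepted by the prefix test must be the length difference
theorem pvPrefix_hit (a b : List Char) (i : Int) (h1 : 1 ≤ i) (h2 : i < (b.length : Int))
    (he : PySem.List.slice b (some i) none = a) : i = (b.length : Int) - (a.length : Int) := by
  obtain ⟨k, rfl⟩ : ∃ k : Nat, i = (k : Int) := ⟨i.toNat, (Int.toNat_of_nonneg (by omega)).symm⟩
  rw [PySem.List.slice_from_natCast] at he
  have := congrArg List.length he
  simp [List.length_drop] at this
  omega

-- an index accepted by the suffix test must be the length difference
theorem pvSuffix_hit (a b : List Char) (i : Int) (h1 : 1 ≤ i) (h2 : i < (b.length : Int))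
    (he : PySem.List.slice b none (some (-i)) = a) : i = (b.length : Int) - (a.length : Int) := by
  obtain ⟨k, rfl⟩ : ∃ k : Nat, i = (k : Int) := ⟨i.toNat, (Int.toNat_of_nonneg (by omega)).symm⟩
  rw [PySem.List.slice_to_neg_natCast _ _ (by omega)] at he
  have := congrArg List.length he
  simp [List.length_take] at this
  omega

-- the char_insertion block never fires when its guard len(s2) > len(s1)+1 holds
theorem pvAInsLoop_eq_none (a b : List Char) (hg : (a.length : Int) + 1 < (b.length : Int)) :
    pvAInsLoop a b = none := by
  unfold pvAInsLoop
  rw [List.findSome?_eq_none_iff]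
  intro i hi
  rw [List.findSome?_eq_none_iff]
  intro j hj
  rw [PySem.List.mem_pyRange_one] at hi hj
  split_ifs with h
  · exfalso
    obtain ⟨he1, he2⟩ := h
    obtain ⟨ki, rfl⟩ : ∃ k : Nat, i = (k : Int) := ⟨i.toNat, (Int.toNat_of_nonneg (by omega)).symm⟩
    obtain ⟨kj, rfl⟩ : ∃ k : Nat, j = (k : Int) := ⟨j.toNat, (Int.toNat_of_nonneg (by omega)).symm⟩
    rw [show ((ki : Int) + (kj : Int)) = ((ki + kj : Nat) : Int) by push_cast; ring,
        show ((ki : Int) + 1) = ((ki + 1 : Nat) : Int) by push_cast; ring,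
        PySem.List.slice_to_natCast, PySem.List.slice_to_natCast] at he1
    have hl1 := congrArg List.length he1
    simp [List.length_take] at hl1
    rw [show ((ki : Int) + (kj : Int) + 1) = ((ki + kj + 1 : Nat) : Int) by push_cast; ring,
        show ((ki : Int) + 1) = ((ki + 1 : Nat) : Int) by push_cast; ring,
        PySem.List.slice_from_natCast, PySem.List.slice_from_natCast] at he2
    have hl2 := congrArg List.length he2
    simp [List.length_drop] at hl2
    omega
  · rfl

-- the prefix loop finds nothing when no admissible index passes its test
theorem pvAPrefixLoop_none (a b : List Char)
    (h : ∀ i : Int, 1 ≤ i → i ≤ 3 → i < (b.length : Int) → PySem.List.slice b (some i) none ≠ a) :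
    pvAPrefixLoop a b = none := by
  unfold pvAPrefixLoop
  rw [List.findSome?_eq_none_iff]
  intro i hi
  rw [PySem.List.mem_pyRange_one] at hi
  split_ifs with he
  · exact absurd he (h i hi.1 (by omega) (by omega))
  · rfl

theorem pvASuffixLoop_none (a b : List Char)
    (h : ∀ i : Int, 1 ≤ i → i ≤ 3 → i < (b.length : Int) → PySem.List.slice b none (some (-i)) ≠ a) :
    pvASuffixLoop a b = none := by
  unfold pvASuffixLoop
  rw [List.findSome?_eq_none_iff]
  intro i hi
  rw [PySem.List.mem_pyRange_one] at hi
  split_ifs with he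
  · exact absurd he (h i hi.1 (by omega) (by omega))
  · rfl

-- ===== VERDICT (by name: the statement is the Claim_ definition above) =====
theorem prefix_suffix_analysis_py_spec : Claim_equal_prefix_suffix_analysis_py := by
  intro s1 s2 _
  unfold Spec_prefix_suffix_analysis_py prefix_suffix_analysis_py prefix_suffix_analysis_py_alt
  dsimp only
  set a := PySem.Chars.lower s1.toList with ha
  set b := PySem.Chars.lower s2.toList with hb
  set d : Int := (b.length : Int) - (a.length : Int) with hd
  by_cases hg : 1 ≤ d ∧ d ≤ 3 ∧ d < (b.length : Int)
  · obtain ⟨hg1, hg2, hg3⟩ := hg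
    have hmem : d ∈ PySem.List.pyRange 1 (min 4 (b.length : Int)) 1 := by
      rw [PySem.List.mem_pyRange_one]; omega
    by_cases hp : PySem.List.slice b (some d) none = a
    · have hpre : pvAPrefixLoop a b =
          some (true, [("variant", "prefix_added"), ("prefix", String.ofList (PySem.List.slice b none (some d)))]) := by
        unfold pvAPrefixLoop
        rw [pvFindSome_unique _ d _ hmem]
        · simp [hp]
        · intro j hj hji
          rw [PySem.List.mem_pyRange_one] at hj
          split_ifs with he
          · exfalso
            have hjd := pvPrefix_hit a b j hj.1 (by omega) he
            rw [← hd] at hjd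
            exact hji hjd
          · rfl
      simp only [hpre]
      rw [if_pos ⟨hg1, hg2, hg3⟩, if_pos hp]
    · have hpre : pvAPrefixLoop a b = none := by
        apply pvAPrefixLoop_none
        intro i hi1 hi2 hi3 he
        have hid := pvPrefix_hit a b i hi1 hi3 he
        rw [← hd] at hid
        rw [hid] at he
        exact hp he
      by_cases hs : PySem.List.slice b none (some (-d)) = a
      · have hsuf : pvASuffixLoop a b =
            some (true, [("variant", "suffix_added"), ("suffix", String.ofList (PySem.List.slice b (some (-d)) none))]) := by
          unfold pvASuffixLoop
          rw [pvFindSome_unique _ d _ hmem]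
          · simp [hs]
          · intro j hj hji
            rw [PySem.List.mem_pyRange_one] at hj
            split_ifs with he
            · exfalso
              have hjd := pvSuffix_hit a b j hj.1 (by omega) he
              rw [← hd] at hjd
              exact hji hjd
            · rfl
        simp only [hpre, hsuf]
        rw [if_pos ⟨hg1, hg2, hg3⟩, if_neg hp, if_pos hs]
      · have hsuf : pvASuffixLoop a b = none := by
          apply pvASuffixLoop_none
          intro i hi1 hi2 hi3 he
          have hid := pvSuffix_hit a b i hi1 hi3 he
          rw [← hd] at hid
          rw [hid] at he
          exact hs he
        by_cases hgr : ((b.length : Int) > (a.length : Int) + 1)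
        · simp only [hpre, hsuf, if_pos hgr, pvAInsLoop_eq_none a b (by omega)]
          rw [if_pos (show (1 : Int) ≤ d ∧ d ≤ 3 ∧ d < (b.length : Int) from ⟨hg1, hg2, hg3⟩),
              if_neg hp, if_neg hs]
        · simp only [hpre, hsuf, if_neg hgr]
          rw [if_pos (show (1 : Int) ≤ d ∧ d ≤ 3 ∧ d < (b.length : Int) from ⟨hg1, hg2, hg3⟩),
              if_neg hp, if_neg hs]
  · have hpre : pvAPrefixLoop a b = none := by
      apply pvAPrefixLoop_none
      intro i hi1 hi2 hi3 he
      have hid := pvPrefix_hit a b i hi1 hi3 he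
      exact hg (by rw [hd]; omega)
    have hsuf : pvASuffixLoop a b = none := by
      apply pvASuffixLoop_none
      intro i hi1 hi2 hi3 he
      have hid := pvSuffix_hit a b i hi1 hi3 he
      exact hg (by rw [hd]; omega)
    by_cases hgr : ((b.length : Int) > (a.length : Int) + 1)
    · simp only [hpre, hsuf, if_pos hgr, pvAInsLoop_eq_none a b (by omega), if_neg hg]
    · simp only [hpre, hsuf, if_neg hgr, if_neg hg]
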